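-- pv_equiv track=rewrite | github.com/yoniLavi/ci-hackathon-app | teams/helpers.py | distribute_participants_to_teams
-- ===== SOURCE A (Python) =====
-- from copy import deepcopy
--
-- def distribute_participants_to_teams(team_sizes, team_levels,
--                                      participants, combos):
--     """ Selects participants based on their skill level and distributes them
--     to a team based on the wanted team size and combined experience level per
--     team
--
--     Returns a dict with the teams and any participants who could not be
--     distributed to a team to be distributed manually """
--     teams = {}
--     team_num = 1
--     team_size = team_sizes.pop(0)
--     team_level = team_levels.pop(0)
--
--     while team_size:
--         combos_to_pick_from = [c for c in combos
--                                if sum(c) == team_level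
--                                and len(c) == team_size]
--         for combo in combos_to_pick_from:
--             # Try to pick the participants from a copy of the participants
--             # if there are not enough participants for the combo skip
--             # otherwise pick them from the actual participants dict
--             participants_copy = deepcopy(participants)
--             try:
--                 members = [participants_copy[c].pop() for c in combo]
--             except IndexError:
--                 continue
--
--             members = [participants[c].pop() for c in combo]
--             teams[f'team_{team_num}'] = members
--             team_num += 1
--
--         if not team_sizes:
--             break
--         team_size = team_sizes.pop(0)
--         team_level = team_levels.pop(0)
--
--     return teams, participants
-- ===== SOURCE B (Python) =====
-- def distribute_participants_to_teams(team_sizes, team_levels, participants, combos):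
--     """Same result as A; indexes combos by (sum, len) once and tests combo
--     feasibility with per-level remaining counts instead of deep-copying the
--     participants dict per attempt.  Unlike A it does not mutate its arguments
--     (the equivalence is about the return value only)."""
--     groups = {}
--     for c in combos:
--         groups.setdefault((sum(c), len(c)), []).append(c)
--     counts = {k: len(v) for k, v in participants.items()}
--     teams = {}
--     team_num = 1
--     for team_size, team_level in zip(team_sizes, team_levels):
--         if team_size == 0:
--             break
--         for combo in groups.get((team_level, team_size), []):
--             if all(combo.count(c) <= counts.get(c, 0) for c in combo):
--                 members = []
--                 for c in combo:
--                     counts[c] -= 1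
--                     members.append(participants[c][counts[c]])
--                 teams[f'team_{team_num}'] = members
--                 team_num += 1
--     return teams, {k: v[:counts[k]] for k, v in participants.items()}
-- ===== Notes on version B (the rewrite author's own statement) =====
-- stated objective: faster
-- what changed: B indexes combos once by (sum,len) and tracks a per-level remaining count, deciding each combo's feasibility by multiplicity comparison instead of deep-copying the whole participants dict and trial-popping for every combo attempt; the final dict is rebuilt by slicing instead of mutated.
-- outside the precondition, e.g. on distribute_participants_to_teams([2], [11], {5: []}, [(5, 6)]): A returns ({}, {5: []}), B returns ({}, {5: []})
import Mathlib
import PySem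

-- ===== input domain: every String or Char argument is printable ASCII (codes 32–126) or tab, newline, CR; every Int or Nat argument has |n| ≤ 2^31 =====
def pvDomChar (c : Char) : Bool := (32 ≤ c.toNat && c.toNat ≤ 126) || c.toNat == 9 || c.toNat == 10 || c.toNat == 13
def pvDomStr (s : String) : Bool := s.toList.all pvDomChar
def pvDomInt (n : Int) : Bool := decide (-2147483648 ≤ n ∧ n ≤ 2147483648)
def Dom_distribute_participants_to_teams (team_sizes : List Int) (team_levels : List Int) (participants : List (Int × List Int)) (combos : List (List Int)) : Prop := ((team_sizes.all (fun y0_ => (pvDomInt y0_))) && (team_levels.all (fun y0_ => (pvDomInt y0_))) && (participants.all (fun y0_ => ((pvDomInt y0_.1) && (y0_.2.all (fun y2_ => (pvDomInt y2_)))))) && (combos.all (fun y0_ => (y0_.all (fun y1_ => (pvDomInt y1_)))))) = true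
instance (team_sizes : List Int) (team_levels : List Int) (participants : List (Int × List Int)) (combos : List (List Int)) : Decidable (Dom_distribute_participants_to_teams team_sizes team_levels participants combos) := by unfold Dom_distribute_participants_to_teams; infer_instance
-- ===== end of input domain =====

-- ===== PORT A =====
-- B re-implements A's team distribution: combos are indexed once by (sum, len) and combo
-- feasibility is decided by per-level remaining counts instead of a deepcopy trial-pop per
-- combo attempt (objective: faster; A mutates team_sizes/team_levels/participants in place,
-- B does not — the equivalence proved here is about the return value).

-- first-match lookup / in-place update of a Python-dict association list
def pvLook {k : Type} {b : Type} [DecidableEq k] (l : List (k × b)) (c : k) : Option b :=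
  match l with
  | [] => none
  | (a, v) :: t => if a = c then some v else pvLook t c

def pvSetVal {k : Type} {b : Type} [DecidableEq k] (l : List (k × b)) (c : k) (v : b) : List (k × b) :=
  match l with
  | [] => []
  | (a, w) :: t => if a = c then (a, v) :: t else (a, w) :: pvSetVal t c v

-- participants[c].pop(): none = KeyError (c not a key; outside Pre_ when A reaches it)
-- or IndexError (empty list; caught by A's try)
def pvPopOne? (parts : List (Int × List Int)) (c : Int) : Option (Int × List (Int × List Int)) :=
  match pvLook parts c with
  | none => none
  | some xs =>
    match xs.getLast? with
    | none => none
    | some x => some (x, pvSetVal parts c xs.dropLast)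

-- [participants[c].pop() for c in combo]
def pvPopMany? (parts : List (Int × List Int)) : List Int → Option (List Int × List (Int × List Int))
  | [] => some ([], parts)
  | c :: rest =>
    match pvPopOne? parts c with
    | none => none
    | some (x, parts') =>
      match pvPopMany? parts' rest with
      | none => none
      | some (ms, parts'') => some (x :: ms, parts'')

-- A's inner 'for combo in combos_to_pick_from' loop
def pvTryCombos (matched : List (List Int)) (teams : List (String × List Int)) (num : Int)
    (parts : List (Int × List Int)) : List (String × List Int) × Int × List (Int × List Int) :=
  match matched with
  | [] => (teams, num, parts)
  | combo :: rest =>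
    match pvPopMany? parts combo with      -- trial pops on the deepcopy (same state as parts)
    | none => pvTryCombos rest teams num parts
    | some _ =>
      match pvPopMany? parts combo with    -- the real pops
      | none => pvTryCombos rest teams num parts
      | some (members, parts') =>
          pvTryCombos rest (teams ++ [("team_" ++ PySem.Int.toStr num, members)]) (num + 1) parts'

-- A's 'while team_size' loop (sizes/levels are the not-yet-popped tails)
def pvLoopA (combos : List (List Int)) (size level : Int) (sizes levels : List Int)
    (teams : List (String × List Int)) (num : Int) (parts : List (Int × List Int)) :
    List (String × List Int) × List (Int × List Int) :=
  if size = 0 then (teams, parts)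
  else
    let matched := combos.filter (fun c => c.sum == level && (c.length : Int) == size)
    let r := pvTryCombos matched teams num parts
    match sizes, levels with
    | [], _ => (r.1, r.2.2)
    | s :: ss, l :: ls => pvLoopA combos s l ss ls r.1 r.2.1 r.2.2
    | _ :: _, [] => (r.1, r.2.2)   -- Python raises IndexError here; outside Pre_

def distribute_participants_to_teams (team_sizes : List Int) (team_levels : List Int) (participants : List (Int × List Int)) (combos : List (List Int)) : (List (String × List Int)) × (List (Int × List Int)) :=
  match team_sizes, team_levels with
  | s :: ss, l :: ls => pvLoopA combos s l ss ls [] 1 participants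
  | _, _ => ([], participants)   -- team_sizes.pop(0)/team_levels.pop(0) on []: IndexError; outside Pre_

-- ===== PORT B =====
-- groups.setdefault((sum(c), len(c)), []).append(c)
def pvGroupAdd (g : List ((Int × Int) × List (List Int))) (key : Int × Int) (c : List Int) :
    List ((Int × Int) × List (List Int)) :=
  match g with
  | [] => [(key, [c])]
  | (a, v) :: t => if a = key then (a, v ++ [c]) :: t else (a, v) :: pvGroupAdd t key c

-- counts.get(c, 0)
def pvCntD (counts : List (Int × Int)) (c : Int) : Int := (pvLook counts c).getD 0

-- all(combo.count(c) <= counts.get(c, 0) for c in combo)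
def pvFeasible (counts : List (Int × Int)) (combo : List Int) : Bool :=
  combo.all (fun c => (combo.count c : Int) ≤ pvCntD counts c)

-- the member-picking loop: counts[c] -= 1; members.append(participants[c][counts[c]])
-- (under the pvFeasible guard the index is always in range and c is always a key)
def pvPick (counts : List (Int × Int)) (participants : List (Int × List Int)) :
    List Int → List Int × List (Int × Int)
  | [] => ([], counts)
  | c :: rest =>
    let n := pvCntD counts c - 1
    let m := PySem.List.pyGetD ((pvLook participants c).getD []) n 0
    let r := pvPick (pvSetVal counts c n) participants rest
    (m :: r.1, r.2)

-- B's inner 'for combo in groups.get((level, size), [])' loop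
def pvInner (participants : List (Int × List Int)) (group : List (List Int))
    (teams : List (String × List Int)) (num : Int) (counts : List (Int × Int)) :
    List (String × List Int) × Int × List (Int × Int) :=
  match group with
  | [] => (teams, num, counts)
  | combo :: rest =>
    if pvFeasible counts combo then
      let r := pvPick counts participants combo
      pvInner participants rest (teams ++ [("team_" ++ PySem.Int.toStr num, r.1)]) (num + 1) r.2
    else pvInner participants rest teams num counts

-- B's 'for team_size, team_level in zip(...)' loop
def pvLoopB (groups : List ((Int × Int) × List (List Int))) (participants : List (Int × List Int))
    (pairs : List (Int × Int)) (teams : List (String × List Int)) (num : Int)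
    (counts : List (Int × Int)) : List (String × List Int) × List (Int × Int) :=
  match pairs with
  | [] => (teams, counts)
  | (size, level) :: rest =>
    if size = 0 then (teams, counts)
    else
      let r := pvInner participants ((pvLook groups (level, size)).getD []) teams num counts
      pvLoopB groups participants rest r.1 r.2.1 r.2.2

def distribute_participants_to_teams_alt (team_sizes : List Int) (team_levels : List Int) (participants : List (Int × List Int)) (combos : List (List Int)) : (List (String × List Int)) × (List (Int × List Int)) :=
  let groups := combos.foldl (fun g c => pvGroupAdd g (c.sum, (c.length : Int)) c) []
  let counts0 := participants.map (fun kv => (kv.1, (kv.2.length : Int)))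
  let r := pvLoopB groups participants (team_sizes.zip team_levels) [] 1 counts0
  (r.1, participants.map (fun kv => (kv.1, PySem.List.slice kv.2 none (some (pvCntD r.2 kv.1)))))

-- ===== PRECONDITION & SPEC =====
-- Pre_ excludes exactly the inputs on which Python A raises: an empty team_sizes or a
-- team_levels list shorter than the number of pops A performs (IndexError), and any
-- (sum,len)-matched combo containing a level that is not a key of participants (KeyError) —
-- the key condition is slightly wider than A's exact raise set: when an earlier level of the
-- same combo runs out of participants first, the caught IndexError makes A skip the combo and
-- return (B returns the same value there; see the cite).  The Nodup conjunct excludes no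
-- Python input: a Python dict cannot carry duplicate keys.
def Pre_distribute_participants_to_teams (team_sizes : List Int) (team_levels : List Int) (participants : List (Int × List Int)) (combos : List (List Int)) : Prop :=
  team_sizes ≠ [] ∧
  min team_sizes.length ((team_sizes.takeWhile (fun s => s != 0)).length + 1) ≤ team_levels.length ∧
  (participants.map Prod.fst).Nodup ∧
  ∀ combo ∈ combos,
    (∃ p ∈ (team_sizes.zip team_levels).takeWhile (fun p => p.1 != 0),
        combo.sum = p.2 ∧ (combo.length : Int) = p.1) →
    ∀ c ∈ combo, c ∈ participants.map Prod.fst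
instance (team_sizes : List Int) (team_levels : List Int) (participants : List (Int × List Int)) (combos : List (List Int)) : Decidable (Pre_distribute_participants_to_teams team_sizes team_levels participants combos) := by unfold Pre_distribute_participants_to_teams; infer_instance

def pvWitness_distribute_participants_to_teams : List Int × List Int × (List (Int × List Int)) × List (List Int) :=
  ([2], [3], [(1, [10]), (2, [20])], [[1, 2]])

def Spec_distribute_participants_to_teams (team_sizes : List Int) (team_levels : List Int) (participants : List (Int × List Int)) (combos : List (List Int)) (out : (List (String × List Int)) × (List (Int × List Int))) : Prop := out = distribute_participants_to_teams_alt team_sizes team_levels participants combos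
instance (team_sizes : List Int) (team_levels : List Int) (participants : List (Int × List Int)) (combos : List (List Int)) (out : (List (String × List Int)) × (List (Int × List Int))) : Decidable (Spec_distribute_participants_to_teams team_sizes team_levels participants combos out) := by unfold Spec_distribute_participants_to_teams; infer_instance

-- ===== CLAIM (what is proved, stated in full; the proofs are below) =====
def Claim_equal_distribute_participants_to_teams : Prop := ∀ (team_sizes : List Int) (team_levels : List Int) (participants : List (Int × List Int)) (combos : List (List Int)), Dom_distribute_participants_to_teams team_sizes team_levels participants combos → Pre_distribute_participants_to_teams team_sizes team_levels participants combos → Spec_distribute_participants_to_teams team_sizes team_levels participants combos (distribute_participants_to_teams team_sizes team_levels participants combos)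

-- ===== LEMMAS AND PROOFS =====

-- A-state abstraction: the participants dict A carries equals the original dict with every
-- value truncated to its current remaining count.
def pvStOf (parts0 : List (Int × List Int)) (counts : List (Int × Int)) : List (Int × List Int) :=
  parts0.map (fun kv => (kv.1, kv.2.take (pvCntD counts kv.1).toNat))

def pvBounds (parts0 : List (Int × List Int)) (counts : List (Int × Int)) : Prop :=
  ∀ kv ∈ parts0, 0 ≤ pvCntD counts kv.1 ∧ pvCntD counts kv.1 ≤ (kv.2.length : Int)

theorem pvLook_mapH {b : Type} (parts0 : List (Int × List Int)) (h : Int → List Int → b) (c : Int) :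
    pvLook (parts0.map (fun kv => (kv.1, h kv.1 kv.2))) c = (pvLook parts0 c).map (h c) := by
  induction parts0 with
  | nil => simp [pvLook]
  | cons kv t ih =>
    obtain ⟨a, v⟩ := kv
    by_cases hac : a = c
    · subst hac; simp [pvLook]
    · simp [pvLook, hac, ih]

theorem pvLook_of_mem_nodup {b : Type} {l : List (Int × b)} {kv : Int × b}
    (hm : kv ∈ l) (hnd : (l.map Prod.fst).Nodup) : pvLook l kv.1 = some kv.2 := by
  induction l with
  | nil => cases hm
  | cons hd t ih =>
    obtain ⟨a, v⟩ := hd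
    rcases List.mem_cons.mp hm with h | h
    · subst h; simp [pvLook]
    · have hnd' := hnd
      simp only [List.map_cons, List.nodup_cons] at hnd'
      have hne : a ≠ kv.1 := by
        intro he
        exact hnd'.1 (he ▸ (List.mem_map.mpr ⟨kv, h, rfl⟩))
      simp [pvLook, hne, ih h hnd'.2]

theorem pvLook_isSome_of_mem_keys {b : Type} {l : List (Int × b)} {c : Int}
    (h : c ∈ l.map Prod.fst) : ∃ v, pvLook l c = some v := by
  induction l with
  | nil => simp at h
  | cons hd t ih =>
    obtain ⟨a, v⟩ := hd
    by_cases hac : a = c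
    · exact ⟨v, by simp [pvLook, hac]⟩
    · simp only [List.map_cons, List.mem_cons] at h
      rcases h with h | h
      · exact absurd h.symm hac
      · obtain ⟨w, hw⟩ := ih h
        exact ⟨w, by simp [pvLook, hac, hw]⟩

theorem pvLook_mem {b : Type} {l : List (Int × b)} {c : Int} {v : b}
    (h : pvLook l c = some v) : (c, v) ∈ l := by
  induction l with
  | nil => simp [pvLook] at h
  | cons hd t ih =>
    obtain ⟨a, w⟩ := hd
    by_cases hac : a = c
    · subst hac; simp [pvLook] at h; simp [h]
    · simp [pvLook, hac] at h
      exact List.mem_cons_of_mem _ (ih h)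

theorem map_fst_setVal {b : Type} (l : List (Int × b)) (c : Int) (v : b) :
    (pvSetVal l c v).map Prod.fst = l.map Prod.fst := by
  induction l with
  | nil => simp [pvSetVal]
  | cons hd t ih =>
    obtain ⟨a, w⟩ := hd
    by_cases hac : a = c <;> simp [pvSetVal, hac, ih]

theorem pvLook_setVal_self {b : Type} {l : List (Int × b)} {c : Int} (v : b)
    (hck : c ∈ l.map Prod.fst) : pvLook (pvSetVal l c v) c = some v := by
  induction l with
  | nil => simp at hck
  | cons hd t ih =>
    obtain ⟨a, w⟩ := hd
    by_cases hac : a = c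
    · simp [pvSetVal, pvLook, hac]
    · have h' : c ∈ t.map Prod.fst := by
        simp only [List.map_cons, List.mem_cons] at hck
        rcases hck with h | h
        · exact absurd h.symm hac
        · exact h
      simp [pvSetVal, pvLook, hac, ih h']

theorem pvLook_setVal_ne {b : Type} (l : List (Int × b)) (c x : Int) (v : b)
    (hx : x ≠ c) : pvLook (pvSetVal l c v) x = pvLook l x := by
  induction l with
  | nil => simp [pvSetVal]
  | cons hd t ih =>
    obtain ⟨a, w⟩ := hd
    by_cases hac : a = c
    · subst hac
      have hax : ¬ a = x := fun h => hx h.symm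
      simp [pvSetVal, pvLook, hax]
    · simp [pvSetVal, pvLook, hac, ih]

theorem pvCntD_setVal_self {counts : List (Int × Int)} {c : Int} (v : Int)
    (hck : c ∈ counts.map Prod.fst) : pvCntD (pvSetVal counts c v) c = v := by
  unfold pvCntD
  rw [pvLook_setVal_self v hck]
  rfl

theorem pvCntD_setVal_ne {counts : List (Int × Int)} {c x : Int} (v : Int)
    (hx : x ≠ c) : pvCntD (pvSetVal counts c v) x = pvCntD counts x := by
  unfold pvCntD
  rw [pvLook_setVal_ne _ _ _ _ hx]

theorem pvStOf_congr (t : List (Int × List Int)) (c1 c2 : List (Int × Int))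
    (h : ∀ kv ∈ t, pvCntD c1 kv.1 = pvCntD c2 kv.1) : pvStOf t c1 = pvStOf t c2 := by
  unfold pvStOf
  exact List.map_congr_left (fun kv hm => by rw [h kv hm])

theorem pvStOf_setVal (parts0 : List (Int × List Int)) (counts : List (Int × Int)) (c : Int)
    (n : Int) (hnd : (parts0.map Prod.fst).Nodup) (hc : c ∈ parts0.map Prod.fst)
    (hck : c ∈ counts.map Prod.fst) :
    pvStOf parts0 (pvSetVal counts c n) =
      pvSetVal (pvStOf parts0 counts) c (((pvLook parts0 c).getD []).take n.toNat) := by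
  induction parts0 with
  | nil => simp [pvStOf, pvSetVal]
  | cons kv t ih =>
    obtain ⟨a, v⟩ := kv
    have hnd' : (t.map Prod.fst).Nodup := (List.nodup_cons.mp (by simpa using hnd)).2
    have hnota : a ∉ t.map Prod.fst := (List.nodup_cons.mp (by simpa using hnd)).1
    by_cases hac : a = c
    · subst hac
      have hcnt : pvCntD (pvSetVal counts a n) a = n := pvCntD_setVal_self n hck
      have htail : pvStOf t (pvSetVal counts a n) = pvStOf t counts := by
        apply pvStOf_congr
        intro kv hm
        have hne : kv.1 ≠ a := fun he => hnota (he ▸ List.mem_map.mpr ⟨kv, hm, rfl⟩)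
        exact pvCntD_setVal_ne n hne
      simp [pvStOf, pvSetVal, pvLook, hcnt]
      simpa [pvStOf] using htail
    · have h' : c ∈ t.map Prod.fst := by
        simp only [List.map_cons, List.mem_cons] at hc
        rcases hc with h | h
        · exact absurd h.symm hac
        · exact h
      have hcons : pvCntD (pvSetVal counts c n) a = pvCntD counts a := pvCntD_setVal_ne n hac
      have hiht := ih hnd' h'
      simp [pvStOf, pvSetVal, pvLook, hac, hcons]
      simpa [pvStOf, pvLook, hac] using hiht

theorem pvLook_stOf (parts0 : List (Int × List Int)) (counts : List (Int × Int)) (c : Int) :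
    pvLook (pvStOf parts0 counts) c = (pvLook parts0 c).map (fun v => v.take (pvCntD counts c).toNat) := by
  unfold pvStOf
  exact pvLook_mapH parts0 (fun k v => v.take (pvCntD counts k).toNat) c

theorem pvPopOne_char (parts0 : List (Int × List Int)) (counts : List (Int × Int)) (c : Int)
    (hnd : (parts0.map Prod.fst).Nodup) (hc : c ∈ parts0.map Prod.fst)
    (hk : counts.map Prod.fst = parts0.map Prod.fst) (hb : pvBounds parts0 counts) :
    pvPopOne? (pvStOf parts0 counts) c =
      if pvCntD counts c ≤ 0 then none
      else some (PySem.List.pyGetD ((pvLook parts0 c).getD []) (pvCntD counts c - 1) 0,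
                 pvStOf parts0 (pvSetVal counts c (pvCntD counts c - 1))) := by
  obtain ⟨v, hv⟩ := pvLook_isSome_of_mem_keys hc
  have hvb := hb _ (pvLook_mem hv)
  simp only at hvb
  have hck : c ∈ counts.map Prod.fst := by rw [hk]; exact hc
  unfold pvPopOne?
  rw [pvLook_stOf, hv]
  by_cases hn : pvCntD counts c ≤ 0
  · have h0 : (pvCntD counts c).toNat = 0 := by omega
    simp [h0, hn]
  · have hpos : 0 < (pvCntD counts c).toNat := by omega
    obtain ⟨m, hm⟩ : ∃ m, (pvCntD counts c).toNat = m + 1 := ⟨(pvCntD counts c).toNat - 1, by omega⟩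
    have hlen : m + 1 ≤ v.length := by omega
    have hmv : m < v.length := by omega
    have hlast : (v.take (m + 1)).getLast? = some v[m] := by
      rw [List.getLast?_eq_getElem?]
      simp [List.length_take, Nat.min_eq_left hlen]
    have hdrop : (v.take (m + 1)).dropLast = v.take m := by
      rw [List.dropLast_eq_take]
      simp only [List.length_take, List.take_take]
      congr 1
      omega
    have h1 : (pvCntD counts c - 1).toNat = m := by omega
    have h2 : PySem.List.pyGetD v (pvCntD counts c - 1) 0 = v[m] := by
      rw [PySem.List.pyGetD_of_nonneg v 0 (by omega)]
      rw [h1]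
      exact List.getD_eq_getElem v 0 hmv
    rw [hm]
    simp only [Option.map_some, Option.getD_some]
    rw [pvStOf_setVal parts0 counts c (pvCntD counts c - 1) hnd hc hck, hv]
    simp only [Option.getD_some]
    rw [h2, h1]
    simp [hlast, hdrop, hn]

theorem pvPick_keys (counts : List (Int × Int)) (parts0 : List (Int × List Int))
    (combo : List Int) : (pvPick counts parts0 combo).2.map Prod.fst = counts.map Prod.fst := by
  induction combo generalizing counts with
  | nil => simp [pvPick]
  | cons c rest ih => simp [pvPick, ih, map_fst_setVal]

theorem pvFeas_cons (counts : List (Int × Int)) (c : Int) (rest : List Int)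
    (hpos : 0 < pvCntD counts c) (hck : c ∈ counts.map Prod.fst) :
    pvFeasible counts (c :: rest) = pvFeasible (pvSetVal counts c (pvCntD counts c - 1)) rest := by
  have hiff : ∀ x y : Bool, (x = true ↔ y = true) → x = y := by decide
  apply hiff
  simp only [pvFeasible, List.all_eq_true, decide_eq_true_eq]
  constructor
  · intro h x hx
    by_cases hxc : x = c
    · subst hxc
      have hc := h x (List.mem_cons_self)
      rw [List.count_cons_self] at hc
      rw [pvCntD_setVal_self _ hck]
      push_cast at hc ⊢
      omega
    · have hx' := h x (List.mem_cons_of_mem _ hx)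
      rw [List.count_cons_of_ne (Ne.symm hxc)] at hx'
      rw [pvCntD_setVal_ne _ hxc]
      exact hx'
  · intro h x hx
    rcases List.mem_cons.mp hx with hxc | hxr
    · subst hxc
      rw [List.count_cons_self]
      by_cases hcr : x ∈ rest
      · have := h x hcr
        rw [pvCntD_setVal_self _ hck] at this
        push_cast at this ⊢
        omega
      · rw [List.count_eq_zero_of_not_mem hcr]
        push_cast
        omega
    · by_cases hxc : x = c
      · subst hxc
        rw [List.count_cons_self]
        have := h x hxr
        rw [pvCntD_setVal_self _ hck] at this
        push_cast at this ⊢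
        omega
      · rw [List.count_cons_of_ne (Ne.symm hxc)]
        have := h x hxr
        rw [pvCntD_setVal_ne _ hxc] at this
        exact this

theorem pvPopMany_char (parts0 : List (Int × List Int)) (hnd : (parts0.map Prod.fst).Nodup) :
    ∀ (combo : List Int) (counts : List (Int × Int)),
      counts.map Prod.fst = parts0.map Prod.fst → pvBounds parts0 counts →
      (∀ c ∈ combo, c ∈ parts0.map Prod.fst) →
      (pvPopMany? (pvStOf parts0 counts) combo =
        (if pvFeasible counts combo then
           some ((pvPick counts parts0 combo).1, pvStOf parts0 (pvPick counts parts0 combo).2)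
         else none))
      ∧ (pvFeasible counts combo = true → pvBounds parts0 (pvPick counts parts0 combo).2) := by
  intro combo
  induction combo with
  | nil =>
    intro counts hk hb _
    refine ⟨by simp [pvPopMany?, pvFeasible, pvPick], ?_⟩
    intro _
    simpa [pvPick] using hb
  | cons c rest ih =>
    intro counts hk hb hmem
    have hc : c ∈ parts0.map Prod.fst := hmem c (by simp)
    have hck : c ∈ counts.map Prod.fst := by rw [hk]; exact hc
    obtain ⟨v, hv⟩ := pvLook_isSome_of_mem_keys hc
    have hvb := hb _ (pvLook_mem hv)
    simp only at hvb
    by_cases hn : pvCntD counts c ≤ 0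
    · have hfeas : pvFeasible counts (c :: rest) = false := by
        rw [Bool.eq_false_iff]
        intro habs
        simp only [pvFeasible, List.all_eq_true, decide_eq_true_eq] at habs
        have := habs c (List.mem_cons_self)
        rw [List.count_cons_self] at this
        push_cast at this
        omega
      refine ⟨?_, ?_⟩
      · simp only [pvPopMany?]
        rw [pvPopOne_char parts0 counts c hnd hc hk hb, if_pos hn, hfeas]
        simp
      · intro hf
        rw [hfeas] at hf
        cases hf
    · have hpos : 0 < pvCntD counts c := by omega
      have hk' : (pvSetVal counts c (pvCntD counts c - 1)).map Prod.fst = parts0.map Prod.fst := by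
        rw [map_fst_setVal, hk]
      have hb' : pvBounds parts0 (pvSetVal counts c (pvCntD counts c - 1)) := by
        intro kv hm
        by_cases hkc : kv.1 = c
        · rw [hkc, pvCntD_setVal_self _ hck]
          have hbv := hb kv hm
          rw [hkc] at hbv
          omega
        · rw [pvCntD_setVal_ne _ hkc]
          exact hb kv hm
      have hmem' : ∀ x ∈ rest, x ∈ parts0.map Prod.fst :=
        fun x hx => hmem x (List.mem_cons_of_mem _ hx)
      obtain ⟨ih1, ih2⟩ := ih (pvSetVal counts c (pvCntD counts c - 1)) hk' hb' hmem'
      have hfeq := pvFeas_cons counts c rest hpos hck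
      refine ⟨?_, ?_⟩
      · simp only [pvPopMany?]
        rw [pvPopOne_char parts0 counts c hnd hc hk hb, if_neg hn]
        simp only [Option.map_some]
        rw [ih1, hfeq]
        by_cases hf : pvFeasible (pvSetVal counts c (pvCntD counts c - 1)) rest
        · rw [if_pos hf, if_pos hf]
          simp [pvPick, hv]
        · rw [if_neg hf, if_neg hf]
      · intro hf
        rw [hfeq] at hf
        have := ih2 hf
        simpa [pvPick] using this

theorem pvInner_char (parts0 : List (Int × List Int)) (hnd : (parts0.map Prod.fst).Nodup) :
    ∀ (matched : List (List Int)) (teams : List (String × List Int)) (num : Int)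
      (counts : List (Int × Int)),
      counts.map Prod.fst = parts0.map Prod.fst → pvBounds parts0 counts →
      (∀ combo ∈ matched, ∀ c ∈ combo, c ∈ parts0.map Prod.fst) →
      (pvTryCombos matched teams num (pvStOf parts0 counts) =
        ((pvInner parts0 matched teams num counts).1,
         (pvInner parts0 matched teams num counts).2.1,
         pvStOf parts0 (pvInner parts0 matched teams num counts).2.2))
      ∧ (pvInner parts0 matched teams num counts).2.2.map Prod.fst = parts0.map Prod.fst
      ∧ pvBounds parts0 (pvInner parts0 matched teams num counts).2.2 := by
  intro matched
  induction matched with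
  | nil =>
    intro teams num counts hk hb _
    exact ⟨by simp [pvTryCombos, pvInner], by simpa [pvInner] using hk, by simpa [pvInner] using hb⟩
  | cons combo rest ih =>
    intro teams num counts hk hb hmem
    have hmemc : ∀ c ∈ combo, c ∈ parts0.map Prod.fst := hmem combo (List.mem_cons_self)
    have hmem' : ∀ cb ∈ rest, ∀ c ∈ cb, c ∈ parts0.map Prod.fst :=
      fun cb hcb => hmem cb (List.mem_cons_of_mem _ hcb)
    obtain ⟨hpm, hbf⟩ := pvPopMany_char parts0 hnd combo counts hk hb hmemc
    by_cases hf : pvFeasible counts combo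
    · have hk2 : (pvPick counts parts0 combo).2.map Prod.fst = parts0.map Prod.fst := by
        rw [pvPick_keys, hk]
      obtain ⟨e1, e2, e3⟩ := ih (teams ++ [("team_" ++ PySem.Int.toStr num, (pvPick counts parts0 combo).1)])
        (num + 1) (pvPick counts parts0 combo).2 hk2 (hbf hf) hmem'
      refine ⟨?_, ?_, ?_⟩
      · simp only [pvTryCombos, pvInner]
        rw [hpm, if_pos hf]
        simpa [hf] using e1
      · simpa [pvInner, hf] using e2
      · simpa [pvInner, hf] using e3
    · obtain ⟨e1, e2, e3⟩ := ih teams num counts hk hb hmem'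
      refine ⟨?_, ?_, ?_⟩
      · simp only [pvTryCombos, pvInner]
        rw [hpm, if_neg hf]
        simpa [hf] using e1
      · simpa [pvInner, hf] using e2
      · simpa [pvInner, hf] using e3

theorem pvGroupAdd_lookup (g : List ((Int × Int) × List (List Int))) (k k' : Int × Int)
    (c : List Int) :
    (pvLook (pvGroupAdd g k c) k').getD [] =
      if k' = k then (pvLook g k').getD [] ++ [c] else (pvLook g k').getD [] := by
  induction g with
  | nil =>
    by_cases h : k' = k
    · subst h; simp [pvGroupAdd, pvLook]
    · have h2 : ¬ k = k' := fun he => h he.symm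
      simp [pvGroupAdd, pvLook, h, h2]
  | cons hd t ih =>
    obtain ⟨a, v⟩ := hd
    by_cases hak : a = k
    · subst hak
      by_cases hk' : k' = a
      · subst hk'; simp [pvGroupAdd, pvLook]
      · have h2 : ¬ a = k' := fun he => hk' he.symm
        simp [pvGroupAdd, pvLook, hk', h2]
    · by_cases hk' : a = k'
      · subst hk'
        have h2 : ¬ k = a := fun he => hak he.symm
        simp [pvGroupAdd, pvLook, hak]
      · simp [pvGroupAdd, pvLook, hak, hk', ih]

theorem pvGroups_lookup (combos : List (List Int)) :
    ∀ (g0 : List ((Int × Int) × List (List Int))) (level size : Int),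
    (pvLook (combos.foldl (fun g c => pvGroupAdd g (c.sum, (c.length : Int)) c) g0) (level, size)).getD [] =
      (pvLook g0 (level, size)).getD [] ++
        combos.filter (fun c => c.sum == level && (c.length : Int) == size) := by
  induction combos with
  | nil => simp
  | cons c cs ih =>
    intro g0 level size
    simp only [List.foldl_cons]
    rw [ih]
    rw [pvGroupAdd_lookup]
    by_cases hp : ((level, size) : Int × Int) = (c.sum, (c.length : Int))
    · have h1 : (c.sum == level) = true := by
        have := (Prod.mk.injEq _ _ _ _ ▸ hp)
        simp only [Prod.mk.injEq] at hp
        simp [hp.1]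
      have h2 : ((c.length : Int) == size) = true := by
        simp only [Prod.mk.injEq] at hp
        simp [hp.2]
      simp [hp, h1, h2]
    · have hnot : ¬ ((c.sum == level) = true ∧ ((c.length : Int) == size) = true) := by
        intro ⟨h1, h2⟩
        apply hp
        simp only [beq_iff_eq] at h1 h2
        simp [h1, h2]
      rw [if_neg hp]
      rcases Decidable.not_and_iff_not_or_not.mp hnot with h | h
      · simp [Bool.eq_false_iff.mpr h]
      · have : (c.sum == level && ((c.length : Int) == size)) = false := by
          cases hcs : (c.sum == level) <;> simp_all
        simp [this]

theorem pvLoopA_cons (combos : List (List Int)) (size level s' l' : Int) (ss' ls' : List Int)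
    (teams : List (String × List Int)) (num : Int) (parts : List (Int × List Int))
    (hsz : size ≠ 0) :
    pvLoopA combos size level (s' :: ss') (l' :: ls') teams num parts =
      pvLoopA combos s' l' ss' ls'
        (pvTryCombos (combos.filter (fun c => c.sum == level && (c.length : Int) == size)) teams num parts).1
        (pvTryCombos (combos.filter (fun c => c.sum == level && (c.length : Int) == size)) teams num parts).2.1
        (pvTryCombos (combos.filter (fun c => c.sum == level && (c.length : Int) == size)) teams num parts).2.2 := by
  rw [pvLoopA, if_neg hsz]

theorem pvLoop_char (parts0 : List (Int × List Int)) (combos : List (List Int))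
    (hnd : (parts0.map Prod.fst).Nodup) :
    ∀ (ss : List Int) (size level : Int) (ls : List Int) (teams : List (String × List Int))
      (num : Int) (counts : List (Int × Int)),
      counts.map Prod.fst = parts0.map Prod.fst → pvBounds parts0 counts →
      (size ≠ 0 → min ss.length ((ss.takeWhile (fun s => s != 0)).length + 1) ≤ ls.length) →
      (∀ combo ∈ combos,
        (∃ p ∈ ((size, level) :: ss.zip ls).takeWhile (fun p => p.1 != 0),
            combo.sum = p.2 ∧ (combo.length : Int) = p.1) →
        ∀ c ∈ combo, c ∈ parts0.map Prod.fst) →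
      (pvLoopA combos size level ss ls teams num (pvStOf parts0 counts) =
        ((pvLoopB (combos.foldl (fun g c => pvGroupAdd g (c.sum, (c.length : Int)) c) []) parts0
            ((size, level) :: ss.zip ls) teams num counts).1,
         pvStOf parts0 (pvLoopB (combos.foldl (fun g c => pvGroupAdd g (c.sum, (c.length : Int)) c) []) parts0
            ((size, level) :: ss.zip ls) teams num counts).2))
      ∧ pvBounds parts0 (pvLoopB (combos.foldl (fun g c => pvGroupAdd g (c.sum, (c.length : Int)) c) []) parts0
            ((size, level) :: ss.zip ls) teams num counts).2 := by
  intro ss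
  induction ss with
  | nil =>
    intro size level ls teams num counts hk hb hlen hkeys
    by_cases hsz : size = 0
    · subst hsz
      refine ⟨?_, ?_⟩
      · simp [pvLoopA, pvLoopB]
      · simpa [pvLoopB] using hb
    · have hlookup : (pvLook (combos.foldl (fun g c => pvGroupAdd g (c.sum, (c.length : Int)) c) []) (level, size)).getD []
          = combos.filter (fun c => c.sum == level && (c.length : Int) == size) := by
        rw [pvGroups_lookup]
        simp [pvLook]
      have hmm : ∀ combo ∈ combos.filter (fun c => c.sum == level && (c.length : Int) == size),
          ∀ c ∈ combo, c ∈ parts0.map Prod.fst := by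
        intro combo hcombo
        have hmc := List.mem_filter.mp hcombo
        have hpred := hmc.2
        simp only [Bool.and_eq_true, beq_iff_eq] at hpred
        apply hkeys combo hmc.1
        refine ⟨(size, level), ?_, hpred.1, hpred.2⟩
        rw [List.takeWhile_cons]
        simp [hsz]
      obtain ⟨e1, e2, e3⟩ := pvInner_char parts0 hnd
        (combos.filter (fun c => c.sum == level && (c.length : Int) == size)) teams num counts hk hb hmm
      refine ⟨?_, ?_⟩
      · simp only [pvLoopA, pvLoopB, if_neg hsz, List.zip_nil_left]
        rw [e1, hlookup]
      · simpa [pvLoopB, if_neg hsz, hlookup] using e3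
  | cons s' ss' ih =>
    intro size level ls teams num counts hk hb hlen hkeys
    by_cases hsz : size = 0
    · subst hsz
      refine ⟨?_, ?_⟩
      · simp [pvLoopA, pvLoopB]
      · simpa [pvLoopB] using hb
    · have hlookup : (pvLook (combos.foldl (fun g c => pvGroupAdd g (c.sum, (c.length : Int)) c) []) (level, size)).getD []
          = combos.filter (fun c => c.sum == level && (c.length : Int) == size) := by
        rw [pvGroups_lookup]
        simp [pvLook]
      have hmm : ∀ combo ∈ combos.filter (fun c => c.sum == level && (c.length : Int) == size),
          ∀ c ∈ combo, c ∈ parts0.map Prod.fst := by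
        intro combo hcombo
        have hmc := List.mem_filter.mp hcombo
        have hpred := hmc.2
        simp only [Bool.and_eq_true, beq_iff_eq] at hpred
        apply hkeys combo hmc.1
        refine ⟨(size, level), ?_, hpred.1, hpred.2⟩
        rw [List.takeWhile_cons]
        simp [hsz]
      obtain ⟨e1, e2, e3⟩ := pvInner_char parts0 hnd
        (combos.filter (fun c => c.sum == level && (c.length : Int) == size)) teams num counts hk hb hmm
      cases ls with
      | nil =>
        exfalso
        have := hlen hsz
        simp only [List.length_nil, List.length_cons, Nat.le_zero] at this
        omega
      | cons l' ls' =>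
        have hlen' : s' ≠ 0 → min ss'.length ((ss'.takeWhile (fun s => s != 0)).length + 1) ≤ ls'.length := by
          intro hs'
          have h0 := hlen hsz
          rw [List.takeWhile_cons] at h0
          simp only [List.length_cons, bne_iff_ne, ne_eq, hs', not_false_eq_true, if_true] at h0
          omega
        have hkeys' : ∀ combo ∈ combos,
            (∃ p ∈ ((s', l') :: ss'.zip ls').takeWhile (fun p => p.1 != 0),
                combo.sum = p.2 ∧ (combo.length : Int) = p.1) →
            ∀ c ∈ combo, c ∈ parts0.map Prod.fst := by
          intro combo hcombo hex
          apply hkeys combo hcombo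
          obtain ⟨p, hp, hpe⟩ := hex
          refine ⟨p, ?_, hpe⟩
          rw [List.takeWhile_cons]
          simp only [bne_iff_ne, ne_eq, hsz, not_false_eq_true, if_true]
          exact List.mem_cons_of_mem _ (by simpa using hp)
        obtain ⟨f1, f2⟩ := ih s' l' ls' ((pvInner parts0
            (combos.filter (fun c => c.sum == level && (c.length : Int) == size)) teams num counts).1)
          ((pvInner parts0 (combos.filter (fun c => c.sum == level && (c.length : Int) == size)) teams num counts).2.1)
          ((pvInner parts0 (combos.filter (fun c => c.sum == level && (c.length : Int) == size)) teams num counts).2.2)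
          e2 e3 hlen' hkeys'
        have hstep : pvLoopB (combos.foldl (fun g c => pvGroupAdd g (c.sum, (c.length : Int)) c) []) parts0
              ((size, level) :: (s' :: ss').zip (l' :: ls')) teams num counts
            = pvLoopB (combos.foldl (fun g c => pvGroupAdd g (c.sum, (c.length : Int)) c) []) parts0
              ((s', l') :: ss'.zip ls')
              (pvInner parts0 (combos.filter (fun c => c.sum == level && (c.length : Int) == size)) teams num counts).1
              (pvInner parts0 (combos.filter (fun c => c.sum == level && (c.length : Int) == size)) teams num counts).2.1
              (pvInner parts0 (combos.filter (fun c => c.sum == level && (c.length : Int) == size)) teams num counts).2.2 := by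
          conv_lhs => rw [pvLoopB]
          rw [if_neg hsz, hlookup, List.zip_cons_cons]
        refine ⟨?_, ?_⟩
        · rw [pvLoopA_cons combos size level s' l' ss' ls' teams num (pvStOf parts0 counts) hsz, e1]
          rw [hstep]
          exact f1
        · rw [hstep]
          exact f2

-- ===== VERDICT (by name: the statement is the Claim_ definition above) =====
theorem distribute_participants_to_teams_spec : Claim_equal_distribute_participants_to_teams := by
  intro ts tl parts combos _ hpre
  obtain ⟨hne, hlen, hnd, hkeys⟩ := hpre
  cases ts with
  | nil => exact absurd rfl hne
  | cons s ss =>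
    cases tl with
    | nil =>
      exfalso
      simp only [List.length_cons, List.length_nil, Nat.le_zero] at hlen
      omega
    | cons l ls =>
      have hk0 : (parts.map (fun kv => (kv.1, (kv.2.length : Int)))).map Prod.fst = parts.map Prod.fst := by
        simp
      have hcnt0 : ∀ kv ∈ parts, pvCntD (parts.map (fun kv => (kv.1, (kv.2.length : Int)))) kv.1 = (kv.2.length : Int) := by
        intro kv hm
        unfold pvCntD
        rw [pvLook_mapH parts (fun k v => (v.length : Int)) kv.1, pvLook_of_mem_nodup hm hnd]
        rfl
      have hb0 : pvBounds parts (parts.map (fun kv => (kv.1, (kv.2.length : Int)))) := by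
        intro kv hm
        rw [hcnt0 kv hm]
        exact ⟨Int.natCast_nonneg _, le_refl _⟩
      have hst0 : pvStOf parts (parts.map (fun kv => (kv.1, (kv.2.length : Int)))) = parts := by
        unfold pvStOf
        conv_rhs => rw [← List.map_id parts]
        apply List.map_congr_left
        intro kv hm
        rw [hcnt0 kv hm]
        simp
      have hlen' : s ≠ 0 → min ss.length ((ss.takeWhile (fun x => x != 0)).length + 1) ≤ ls.length := by
        intro hs
        rw [List.takeWhile_cons] at hlen
        simp only [bne_iff_ne, ne_eq, hs, not_false_eq_true, if_true, List.length_cons] at hlen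
        omega
      have hkeys' : ∀ combo ∈ combos,
          (∃ p ∈ ((s, l) :: ss.zip ls).takeWhile (fun p => p.1 != 0),
              combo.sum = p.2 ∧ (combo.length : Int) = p.1) →
          ∀ c ∈ combo, c ∈ parts.map Prod.fst := by
        simpa [List.zip_cons_cons] using hkeys
      obtain ⟨f1, f2⟩ := pvLoop_char parts combos hnd ss s l ls [] 1
        (parts.map (fun kv => (kv.1, (kv.2.length : Int)))) hk0 hb0 hlen' hkeys'
      have hslice : parts.map (fun kv => (kv.1, PySem.List.slice kv.2 none
            (some (pvCntD (pvLoopB (combos.foldl (fun g c => pvGroupAdd g (c.sum, (c.length : Int)) c) []) parts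
              ((s, l) :: ss.zip ls) [] 1 (parts.map (fun kv => (kv.1, (kv.2.length : Int))))).2 kv.1)))) =
          pvStOf parts (pvLoopB (combos.foldl (fun g c => pvGroupAdd g (c.sum, (c.length : Int)) c) []) parts
              ((s, l) :: ss.zip ls) [] 1 (parts.map (fun kv => (kv.1, (kv.2.length : Int))))).2 := by
        unfold pvStOf
        apply List.map_congr_left
        intro kv hm
        have hnn := (f2 kv hm).1
        rw [← Int.toNat_of_nonneg hnn, PySem.List.slice_to_natCast]
        simp only [Int.toNat_natCast]
      show distribute_participants_to_teams (s :: ss) (l :: ls) parts combos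
        = distribute_participants_to_teams_alt (s :: ss) (l :: ls) parts combos
      rw [show distribute_participants_to_teams (s :: ss) (l :: ls) parts combos
          = pvLoopA combos s l ss ls [] 1 parts from rfl]
      rw [show distribute_participants_to_teams_alt (s :: ss) (l :: ls) parts combos
          = ((pvLoopB (combos.foldl (fun g c => pvGroupAdd g (c.sum, (c.length : Int)) c) []) parts
                ((s :: ss).zip (l :: ls)) [] 1 (parts.map (fun kv => (kv.1, (kv.2.length : Int))))).1,
              parts.map (fun kv => (kv.1, PySem.List.slice kv.2 none
                (some (pvCntD (pvLoopB (combos.foldl (fun g c => pvGroupAdd g (c.sum, (c.length : Int)) c) []) parts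
                  ((s :: ss).zip (l :: ls)) [] 1 (parts.map (fun kv => (kv.1, (kv.2.length : Int))))).2 kv.1))))) from rfl]
      rw [List.zip_cons_cons]
      conv_lhs => rw [← hst0]
      rw [f1, hslice]
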